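-- pv_equiv track=rewrite | github.com/LucasNoga/Workspace-Python | Battle Dev/Battle_dev_2016/banderoles.py | hauteurPoteaux
-- ===== SOURCE A (Python) =====
-- def hauteurPoteaux(data, poteauAtValue):
--     count = 0
--     bool_hauteur = 0
--     for i, pos in enumerate(poteauAtValue[:-1]):
--         hauteurs = data[poteauAtValue[i] + 1:poteauAtValue[i + 1]]
--         for hauteur in hauteurs:
--             if hauteur > data[poteauAtValue[i]]:
--                 bool_hauteur += 1
--         if bool_hauteur == 0:
--             count += poteauAtValue[i + 1] - poteauAtValue[i]
--     return count
-- ===== SOURCE B (Python) =====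
-- def hauteurPoteaux(data, poteauAtValue):
--     # Closed form: the clean-prefix width sum telescopes, so the answer is
--     # poteauAtValue[k] - poteauAtValue[0], where k is the index of the first
--     # height-violating segment (or the last pole if none violates).
--     if not poteauAtValue:
--         return 0
--     pairs = list(zip(poteauAtValue, poteauAtValue[1:]))
--     k = next((i for i, (l, r) in enumerate(pairs)
--               if any(h > data[l] for h in data[l + 1:r])), len(pairs))
--     return poteauAtValue[k] - poteauAtValue[0]
-- ===== Notes on version B (the rewrite author's own statement) =====
-- stated objective: alternative
-- what changed: B drops A's width accumulation entirely: it locates the index k of the first height-violating segment and returns the telescoped closed form poteauAtValue[k] - poteauAtValue[0], whereas A sums per-segment widths gated by a never-reset violation counter.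
import Mathlib
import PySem

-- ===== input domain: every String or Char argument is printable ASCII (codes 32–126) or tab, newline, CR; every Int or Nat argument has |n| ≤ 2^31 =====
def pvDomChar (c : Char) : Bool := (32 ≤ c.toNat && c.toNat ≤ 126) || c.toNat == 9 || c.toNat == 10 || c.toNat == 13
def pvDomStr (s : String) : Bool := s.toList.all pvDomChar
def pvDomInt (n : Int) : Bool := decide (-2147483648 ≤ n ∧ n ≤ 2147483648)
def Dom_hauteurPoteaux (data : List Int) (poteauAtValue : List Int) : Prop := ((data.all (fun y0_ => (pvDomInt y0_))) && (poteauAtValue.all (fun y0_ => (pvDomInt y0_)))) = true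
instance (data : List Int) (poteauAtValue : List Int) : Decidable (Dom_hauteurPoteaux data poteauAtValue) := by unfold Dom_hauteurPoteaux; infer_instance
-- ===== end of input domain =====

-- B replaces A's counter-gated width accumulation by a closed form: it finds the
-- index k of the first violating segment and returns poteauAtValue[k] - poteauAtValue[0]
-- (the prefix width sum telescopes); objective: alternative.

-- ===== PORT A =====
def hauteurPoteaux (data : List Int) (poteauAtValue : List Int) : Int :=
  ((PySem.List.enumerate (PySem.List.slice poteauAtValue none (some (-1)))).foldl
    (fun (st : Int × Int) ip =>
      let hauteurs := PySem.List.slice data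
        (some (PySem.List.pyGetD poteauAtValue ip.1 0 + 1))
        (some (PySem.List.pyGetD poteauAtValue (ip.1 + 1) 0))
      let b := hauteurs.foldl
        (fun bh h =>
          if h > PySem.List.pyGetD data (PySem.List.pyGetD poteauAtValue ip.1 0) 0
          then bh + 1 else bh) st.2
      (if b = 0
       then st.1 + (PySem.List.pyGetD poteauAtValue (ip.1 + 1) 0 - PySem.List.pyGetD poteauAtValue ip.1 0)
       else st.1, b))
    (0, 0)).1

-- ===== PORT B =====
-- index of the first violating pole pair (= length of the pair list if none)
def hpFirst (data : List Int) : List (Int × Int) → Nat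
  | [] => 0
  | (l, r) :: rest =>
      if (PySem.List.slice data (some (l + 1)) (some r)).any
           (fun h => h > PySem.List.pyGetD data l 0)
      then 0
      else hpFirst data rest + 1

def hauteurPoteaux_alt (data : List Int) (poteauAtValue : List Int) : Int :=
  if poteauAtValue = [] then 0
  else
    -- the index hpFirst … ≤ len - 1 is always in range, so getD's default is never used
    poteauAtValue.getD
      (hpFirst data (poteauAtValue.zip (PySem.List.slice poteauAtValue (some 1) none))) 0
    - poteauAtValue.getD 0 0

-- ===== PRECONDITION & SPEC =====
-- Pre_ excludes exactly the inputs on which Python A raises IndexError: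
-- some pair of consecutive poles has a nonempty interior slice whose left pole
-- is not a valid index into data (data[poteauAtValue[i]] is only evaluated when
-- the inner loop runs at least once).
def Pre_hauteurPoteaux (data : List Int) (poteauAtValue : List Int) : Prop :=
  ∀ p ∈ poteauAtValue.zip (poteauAtValue.drop 1),
    PySem.List.slice data (some (p.1 + 1)) (some p.2) ≠ [] →
      PySem.Raise.InRange data.length p.1
instance (data : List Int) (poteauAtValue : List Int) : Decidable (Pre_hauteurPoteaux data poteauAtValue) := by unfold Pre_hauteurPoteaux; infer_instance

def pvWitness_hauteurPoteaux : List Int × List Int := ([3, 1, 2], [0, 2])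

def Spec_hauteurPoteaux (data : List Int) (poteauAtValue : List Int) (out : Int) : Prop := out = hauteurPoteaux_alt data poteauAtValue
instance (data : List Int) (poteauAtValue : List Int) (out : Int) : Decidable (Spec_hauteurPoteaux data poteauAtValue out) := by unfold Spec_hauteurPoteaux; infer_instance

-- ===== CLAIM (what is proved, stated in full; the proofs are below) =====
def Claim_equal_hauteurPoteaux : Prop := ∀ (data : List Int) (poteauAtValue : List Int), Dom_hauteurPoteaux data poteauAtValue → Pre_hauteurPoteaux data poteauAtValue → Spec_hauteurPoteaux data poteauAtValue (hauteurPoteaux data poteauAtValue)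

-- ===== LEMMAS AND PROOFS =====

-- A's inner violation-counting fold, named so the proofs can rewrite it
def hpViol (data : List Int) (l r b : Int) : Int :=
  (PySem.List.slice data (some (l + 1)) (some r)).foldl
    (fun bh h => if h > PySem.List.pyGetD data l 0 then bh + 1 else bh) b

-- A's loop body as a function of the pole pair (left, right)
def hpF (data : List Int) (st : Int × Int) (p : Int × Int) : Int × Int :=
  (if hpViol data p.1 p.2 st.2 = 0 then st.1 + (p.2 - p.1) else st.1,
   hpViol data p.1 p.2 st.2)

-- proof-side intermediate: sum of widths of the clean prefix of pole pairs
def hpGo (data : List Int) : List (Int × Int) → Int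
  | [] => 0
  | (l, r) :: rest =>
      if (PySem.List.slice data (some (l + 1)) (some r)).any
           (fun h => h > PySem.List.pyGetD data l 0)
      then 0
      else (r - l) + hpGo data rest

lemma hpViol_eq (data : List Int) (l r b : Int) :
    hpViol data l r b
      = b + ((PySem.List.slice data (some (l + 1)) (some r)).countP
          (fun h => PySem.List.pyGetD data l 0 < h) : Int) := by
  unfold hpViol
  simpa using PySem.List.foldl_count_if
    (fun h => decide (PySem.List.pyGetD data l 0 < h))
    (PySem.List.slice data (some (l + 1)) (some r)) b

lemma A_as_fold_map (data pav : List Int) :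
    hauteurPoteaux data pav =
      (((PySem.List.enumerate (PySem.List.slice pav none (some (-1)))).map
          (fun ip : Int × Int =>
            (PySem.List.pyGetD pav ip.1 0, PySem.List.pyGetD pav (ip.1 + 1) 0))).foldl
        (hpF data) (0, 0)).1 := by
  rw [List.foldl_map]
  rfl

lemma map_enum_eq_zip (pav : List Int) :
    (PySem.List.enumerate (PySem.List.slice pav none (some (-1)))).map
        (fun ip : Int × Int =>
          (PySem.List.pyGetD pav ip.1 0, PySem.List.pyGetD pav (ip.1 + 1) 0))
      = pav.zip (pav.drop 1) := by
  have hsl : PySem.List.slice pav none (some (-1)) = pav.dropLast := by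
    have h1 : (-1 : Int) = -((1 : Nat) : Int) := by norm_num
    rw [h1, PySem.List.slice_to_neg_natCast pav 1 (by omega), List.dropLast_eq_take]
  rw [hsl]
  apply List.ext_getElem
  · simp [PySem.List.length_enumerate, List.length_dropLast]
  · intro i h1 h2
    have hi : i < (PySem.List.enumerate pav.dropLast 0).length := by
      simpa using h1
    have hlen : pav.dropLast.length = pav.length - 1 := by simp
    have hid : i < pav.dropLast.length := by
      simpa [PySem.List.length_enumerate] using hi
    have hip : i + 1 < pav.length := by omega
    have hip0 : i < pav.length := by omega
    rw [List.getElem_map, PySem.List.getElem_enumerate pav.dropLast 0 i hi,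
        List.getElem_zip]
    have e1 : PySem.List.pyGetD pav ((0 : Int) + (i : Int)) 0 = pav[i] := by
      rw [zero_add, PySem.List.pyGetD_natCast]
      simp [List.getD, hip0]
    have e2 : PySem.List.pyGetD pav ((0 : Int) + (i : Int) + 1) 0 = pav[i + 1] := by
      have h3 : (0 : Int) + (i : Int) + 1 = ((i + 1 : Nat) : Int) := by push_cast; ring
      rw [h3, PySem.List.pyGetD_natCast]
      simp [List.getD, hip]
    rw [e1, e2]
    congr 1
    rw [List.getElem_drop]
    congr 1
    omega

-- once the counter is nonzero, A never adds again
lemma fold_stuck (data : List Int) :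
    ∀ (ps : List (Int × Int)) (c b : Int), 0 < b →
      (ps.foldl (hpF data) (c, b)).1 = c := by
  intro ps
  induction ps with
  | nil => intro c b hb; rfl
  | cons p rest ih =>
      intro c b hb
      have hpos : 0 < b + ((PySem.List.slice data (some (p.1 + 1)) (some p.2)).countP
          (fun h => PySem.List.pyGetD data p.1 0 < h) : Int) := by positivity
      have hstep : hpF data (c, b) p =
          (c, b + ((PySem.List.slice data (some (p.1 + 1)) (some p.2)).countP
            (fun h => PySem.List.pyGetD data p.1 0 < h) : Int)) := by
        simp [hpF, hpViol_eq, hpos.ne']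
      show (rest.foldl (hpF data) (hpF data (c, b) p)).1 = c
      rw [hstep]
      exact ih c _ hpos

-- while the counter is zero, A's fold adds exactly the clean-prefix width sum
lemma fold_run (data : List Int) :
    ∀ (ps : List (Int × Int)) (c : Int),
      (ps.foldl (hpF data) (c, 0)).1 = c + hpGo data ps := by
  intro ps
  induction ps with
  | nil => intro c; simp [hpGo]
  | cons p rest ih =>
      intro c
      obtain ⟨l, r⟩ := p
      by_cases hany : (PySem.List.slice data (some (l + 1)) (some r)).any
          (fun h => h > PySem.List.pyGetD data l 0) = true
      · have hcpos : 0 < ((PySem.List.slice data (some (l + 1)) (some r)).countP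
            (fun h => PySem.List.pyGetD data l 0 < h) : Int) := by
          rcases List.any_eq_true.mp hany with ⟨x, hx, hpx⟩
          have hp : 0 < (PySem.List.slice data (some (l + 1)) (some r)).countP
              (fun h => PySem.List.pyGetD data l 0 < h) :=
            List.countP_pos_iff.mpr ⟨x, hx, by simpa using hpx⟩
          exact_mod_cast hp
        have hstep : hpF data (c, 0) (l, r) =
            (c, ((PySem.List.slice data (some (l + 1)) (some r)).countP
              (fun h => PySem.List.pyGetD data l 0 < h) : Int)) := by
          show (if hpViol data l r (0 : Int) = 0 then c + (r - l) else c,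
                hpViol data l r 0) = _
          rw [hpViol_eq, zero_add, if_neg hcpos.ne']
        show (rest.foldl (hpF data) (hpF data (c, 0) (l, r))).1
          = c + hpGo data ((l, r) :: rest)
        rw [hstep, fold_stuck data rest c _ hcpos]
        simp [hpGo, hany]
      · have hzero : ((PySem.List.slice data (some (l + 1)) (some r)).countP
            (fun h => PySem.List.pyGetD data l 0 < h) : Int) = 0 := by
          have hz : (PySem.List.slice data (some (l + 1)) (some r)).countP
              (fun h => PySem.List.pyGetD data l 0 < h) = 0 := by
            rw [List.countP_eq_zero]
            intro x hx
            simp only [List.any_eq_true, not_exists, not_and] at hany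
            simpa using hany x hx
          exact_mod_cast hz
        have hstep : hpF data (c, 0) (l, r) = (c + (r - l), 0) := by
          show (if hpViol data l r (0 : Int) = 0 then c + (r - l) else c,
                hpViol data l r 0) = _
          rw [hpViol_eq, zero_add, if_pos hzero, hzero]
        show (rest.foldl (hpF data) (hpF data (c, 0) (l, r))).1
          = c + hpGo data ((l, r) :: rest)
        rw [hstep, ih]
        simp [hpGo, hany]
        ring

-- the clean-prefix width sum telescopes to pav[k] - pav[0], k = hpFirst
lemma hpGo_telescope (data : List Int) :
    ∀ (xs : List Int) (a : Int),
      hpGo data ((a :: xs).zip xs)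
        = (a :: xs).getD (hpFirst data ((a :: xs).zip xs)) 0 - a := by
  intro xs
  induction xs with
  | nil => intro a; simp [hpGo, hpFirst]
  | cons b rest ih =>
      intro a
      by_cases hany : (PySem.List.slice data (some (a + 1)) (some b)).any
          (fun h => h > PySem.List.pyGetD data a 0) = true
      · simp [hpGo, hpFirst, hany]
      · simp only [List.zip_cons_cons, hpGo, hpFirst, hany, if_false,
          Bool.false_eq_true]
        rw [ih b]
        simp [List.getD]

-- ===== VERDICT (by name: the statement is the Claim_ definition above) =====
theorem hauteurPoteaux_spec : Claim_equal_hauteurPoteaux := by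
  intro data pav _ _
  unfold Spec_hauteurPoteaux
  rw [A_as_fold_map, map_enum_eq_zip, fold_run, zero_add]
  unfold hauteurPoteaux_alt
  cases pav with
  | nil => simp [hpGo]
  | cons a xs =>
      have hsl : PySem.List.slice (a :: xs) (some 1) none = xs := by
        rw [show (1 : Int) = ((1 : Nat) : Int) from rfl, PySem.List.slice_from_natCast]
        simp
      simp only [List.drop_one, List.tail_cons, hsl, if_neg (List.cons_ne_nil a xs)]
      rw [hpGo_telescope]
      simp [List.getD]
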